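-- pv_equiv track=rewrite | github.com/eddmpython/dartlab | experiments/064_tableHorizontal/011_patchTest.py | _dataRowsPatched
-- ===== SOURCE A (Python) =====
-- def _dataRowsPatched(lines: list[str]) -> list[list[str]]:
--     """단위행/기준일행 뒤의 separator를 기준으로 데이터 행 반환."""
--     rows = []
--     # 마지막 separator 이후가 데이터
--     lastSepIdx = -1
--     for i, line in enumerate(lines):
--         cells = [c.strip() for c in line.strip("|").split("|")]
--         if all(set(c.strip()) <= {"-", ":"} for c in cells if c.strip()):
--             lastSepIdx = i
--
--     if lastSepIdx < 0:
--         return rows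
--
--     for line in lines[lastSepIdx + 1:]:
--         cells = [c.strip() for c in line.strip("|").split("|")]
--         if all(set(c.strip()) <= {"-", ":"} for c in cells if c.strip()):
--             continue
--         rows.append(cells)
--     return rows
-- ===== SOURCE B (Python) =====
-- def _dataRowsPatched(lines: list[str]) -> list[list[str]]:
--     """Single reset-on-separator pass instead of find-last-separator + second scan."""
--     rows = []
--     seen = False
--     for line in lines:
--         cells = [c.strip() for c in line.strip("|").split("|")]
--         if all(set(c.strip()) <= {"-", ":"} for c in cells if c.strip()):
--             rows = []
--             seen = True
--         else:
--             rows.append(cells)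
--     return rows if seen else []
-- ===== Notes on version B (the rewrite author's own statement) =====
-- stated objective: simpler
-- what changed: Fuses A's two scans (find last separator line, then re-scan the tail) into one pass that resets the accumulated rows on every separator and remembers whether any separator was seen.
import Mathlib
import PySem

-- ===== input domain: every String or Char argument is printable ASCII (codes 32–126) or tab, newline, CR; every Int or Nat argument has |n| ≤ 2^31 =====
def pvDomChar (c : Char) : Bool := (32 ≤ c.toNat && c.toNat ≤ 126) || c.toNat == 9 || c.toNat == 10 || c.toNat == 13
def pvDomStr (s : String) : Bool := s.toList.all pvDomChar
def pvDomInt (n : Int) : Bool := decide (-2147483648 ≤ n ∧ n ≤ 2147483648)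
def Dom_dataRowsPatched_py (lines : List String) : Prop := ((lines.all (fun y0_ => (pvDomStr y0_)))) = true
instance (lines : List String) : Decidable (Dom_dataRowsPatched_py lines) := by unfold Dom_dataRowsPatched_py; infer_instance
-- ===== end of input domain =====

-- B fuses A's two scans (find last separator, re-scan the tail) into one reset-on-separator pass.

-- ===== PORT A =====
-- cells = [c.strip() for c in line.strip("|").split("|")]  (shared by both Pythons verbatim)
def pvCells (line : String) : List String :=
  ((PySem.Str.split? (PySem.Str.stripChars line "|") "|").getD []).map PySem.Str.strip

-- all(set(c.strip()) <= {"-", ":"} for c in cells if c.strip())  (shared by both Pythons verbatim)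
def pvIsSep (cells : List String) : Bool :=
  cells.all (fun c => (PySem.Str.strip c).toList.all (fun ch => ch == '-' || ch == ':'))

def dataRowsPatched_py (lines : List String) : List (List String) :=
  let lastSepIdx : Int :=
    (PySem.List.enumerate lines 0).foldl
      (fun acc p => if pvIsSep (pvCells p.2) then p.1 else acc) (-1)
  if lastSepIdx < 0 then []
  else
    (PySem.List.slice lines (some (lastSepIdx + 1)) none).foldl
      (fun rows line =>
        let cells := pvCells line
        if pvIsSep cells then rows else rows ++ [cells]) []

-- ===== PORT B =====
def dataRowsPatched_py_alt (lines : List String) : List (List String) :=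
  let st := lines.foldl
    (fun (st : List (List String) × Bool) line =>
      let cells := pvCells line
      if pvIsSep cells then ([], true) else (st.1 ++ [cells], st.2)) ([], false)
  if st.2 then st.1 else []

-- ===== PRECONDITION & SPEC =====
def Spec_dataRowsPatched_py (lines : List String) (out : List (List String)) : Prop := out = dataRowsPatched_py_alt lines
instance (lines : List String) (out : List (List String)) : Decidable (Spec_dataRowsPatched_py lines out) := by unfold Spec_dataRowsPatched_py; infer_instance

-- ===== CLAIM (what is proved, stated in full; the proofs are below) =====
def Claim_equal_dataRowsPatched_py : Prop := ∀ (lines : List String), Dom_dataRowsPatched_py lines → Spec_dataRowsPatched_py lines (dataRowsPatched_py lines)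

-- ===== LEMMAS AND PROOFS =====

-- A's last-separator index, named for the proofs
def pvLastSep (lines : List String) : Int :=
  (PySem.List.enumerate lines 0).foldl
    (fun acc p => if pvIsSep (pvCells p.2) then p.1 else acc) (-1)

-- B's loop state, named for the proofs
def pvState (lines : List String) : List (List String) × Bool :=
  lines.foldl
    (fun (st : List (List String) × Bool) line =>
      let cells := pvCells line
      if pvIsSep cells then ([], true) else (st.1 ++ [cells], st.2)) ([], false)

theorem pvLastSep_append (xs : List String) (x : String) :
    pvLastSep (xs ++ [x]) =
      if pvIsSep (pvCells x) then (xs.length : Int) else pvLastSep xs := by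
  simp [pvLastSep, PySem.List.enumerate_append, List.foldl_append]

theorem pvLastSep_bounds (xs : List String) :
    -1 ≤ pvLastSep xs ∧ pvLastSep xs < xs.length := by
  induction xs using List.reverseRecOn with
  | nil => simp [pvLastSep, PySem.List.enumerate]
  | append_singleton xs x ih =>
      rw [pvLastSep_append]
      rcases ih with ⟨h1, h2⟩
      split <;> simp <;> omega

theorem pvState_append (xs : List String) (x : String) :
    pvState (xs ++ [x]) =
      if pvIsSep (pvCells x) then ([], true)
      else ((pvState xs).1 ++ [pvCells x], (pvState xs).2) := by
  simp only [pvState, List.foldl_append, List.foldl_cons, List.foldl_nil]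

theorem pvState_seen (xs : List String) :
    (pvState xs).2 = true ↔ 0 ≤ pvLastSep xs := by
  induction xs using List.reverseRecOn with
  | nil => simp [pvState, pvLastSep, PySem.List.enumerate]
  | append_singleton xs x ih =>
      rw [pvState_append, pvLastSep_append]
      split
      · simp
      · simpa using ih

theorem pv_main (xs : List String) : dataRowsPatched_py xs = dataRowsPatched_py_alt xs := by
  induction xs using List.reverseRecOn with
  | nil =>
      simp [dataRowsPatched_py, dataRowsPatched_py_alt,
        PySem.List.enumerate]
  | append_singleton xs x ih =>
      have hA : dataRowsPatched_py xs =
          (if pvLastSep xs < 0 then [] else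
            (PySem.List.slice xs (some (pvLastSep xs + 1)) none).foldl
              (fun rows line =>
                let cells := pvCells line
                if pvIsSep cells then rows else rows ++ [cells]) []) := rfl
      have hA' : dataRowsPatched_py (xs ++ [x]) =
          (if pvLastSep (xs ++ [x]) < 0 then [] else
            (PySem.List.slice (xs ++ [x]) (some (pvLastSep (xs ++ [x]) + 1)) none).foldl
              (fun rows line =>
                let cells := pvCells line
                if pvIsSep cells then rows else rows ++ [cells]) []) := rfl
      have hB : dataRowsPatched_py_alt xs =
          (if (pvState xs).2 then (pvState xs).1 else []) := rfl
      have hB' : dataRowsPatched_py_alt (xs ++ [x]) =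
          (if (pvState (xs ++ [x])).2 then (pvState (xs ++ [x])).1 else []) := rfl
      obtain ⟨hlo, hhi⟩ := pvLastSep_bounds xs
      rw [hA', hB', pvState_append, pvLastSep_append]
      by_cases hs : pvIsSep (pvCells x)
      · -- the new line is a separator: both sides return []
        simp only [hs, if_true]
        have hnn : ¬ ((xs.length : Int) < 0) := by omega
        rw [if_neg hnn]
        have hsl : PySem.List.slice (xs ++ [x]) (some ((xs.length : Int) + 1)) none = [] := by
          rw [PySem.List.slice_from _ (by omega)]
          have h1 : ((xs.length : Int) + 1).toNat = xs.length + 1 := by omega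
          simp [h1]
        simp [hsl]
      · -- not a separator
        rw [Bool.not_eq_true] at hs
        simp only [hs, Bool.false_eq_true, if_false]
        by_cases hseen : 0 ≤ pvLastSep xs
        · -- a separator was seen before: both append the new cells
          have hs2 : (pvState xs).2 = true := (pvState_seen xs).mpr hseen
          rw [if_neg (by omega), hs2, if_pos rfl]
          have hslice : PySem.List.slice (xs ++ [x]) (some (pvLastSep xs + 1)) none
              = PySem.List.slice xs (some (pvLastSep xs + 1)) none ++ [x] := by
            rw [PySem.List.slice_from _ (by omega), PySem.List.slice_from _ (by omega)]
            rw [List.drop_append_of_le_length (by omega)]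
          rw [hslice, List.foldl_append]
          simp only [List.foldl_cons, List.foldl_nil, hs, Bool.false_eq_true, if_false]
          have hih := ih
          rw [hA, if_neg (by omega), hB, hs2, if_pos rfl] at hih
          rw [hih]
        · -- no separator yet: both return []
          have hs2 : (pvState xs).2 = false := by
            cases h : (pvState xs).2
            · rfl
            · exact absurd ((pvState_seen xs).mp h) hseen
          rw [if_pos (by omega), hs2]
          simp

-- ===== VERDICT (by name: the statement is the Claim_ definition above) =====
theorem dataRowsPatched_py_spec : Claim_equal_dataRowsPatched_py := by
  intro lines _
  unfold Spec_dataRowsPatched_py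
  exact pv_main lines
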